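-- pv_equiv track=rewrite | github.com/rizveeredwan/top-k-closed-tree-miner | closed_mining.py | exclude_last_item_of_pattern
-- ===== SOURCE A (Python) =====
-- def exclude_last_item_of_pattern(pattern):
--     # excluding last item of the last event
--     new_pattern = []
--     for i in range(0, len(pattern)):
--         if i == (len(pattern) - 1):
--             if len(pattern[i]) == 1:  # last event will be vanished
--                 pass
--             else:  # only the last item will be escaped
--                 new_pattern.append([])
--                 for j in range(0, len(pattern[i]) - 1):
--                     new_pattern[-1].append(pattern[i][j])
--         else:  # generic event append
--             new_pattern.append([])
--             for j in range(0, len(pattern[i])):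
--                 new_pattern[-1].append(pattern[i][j])
--     return new_pattern
-- ===== SOURCE B (Python) =====
-- def exclude_last_item_of_pattern(pattern):
--     # recursive head-first decomposition: the base case (one remaining event)
--     # truncates or drops the last event; every earlier event is copied and consed.
--     if not pattern:
--         return []
--     head = pattern[0]
--     rest = pattern[1:]
--     if not rest:
--         return [] if len(head) == 1 else [head[:-1]]
--     return [list(head)] + exclude_last_item_of_pattern(rest)
-- ===== Notes on version B (the rewrite author's own statement) =====
-- stated objective: alternative
-- what changed: Replaced A's index loop with a last-iteration branch and per-element inner append loops by a structural recursion on the list: the single-event base case truncates or drops the last event, the recursive step conses a copy of the head; events are copied by slicing/list() in C rather than element-by-element appends (measured ~1.8x at the largest size).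
import Mathlib
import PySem

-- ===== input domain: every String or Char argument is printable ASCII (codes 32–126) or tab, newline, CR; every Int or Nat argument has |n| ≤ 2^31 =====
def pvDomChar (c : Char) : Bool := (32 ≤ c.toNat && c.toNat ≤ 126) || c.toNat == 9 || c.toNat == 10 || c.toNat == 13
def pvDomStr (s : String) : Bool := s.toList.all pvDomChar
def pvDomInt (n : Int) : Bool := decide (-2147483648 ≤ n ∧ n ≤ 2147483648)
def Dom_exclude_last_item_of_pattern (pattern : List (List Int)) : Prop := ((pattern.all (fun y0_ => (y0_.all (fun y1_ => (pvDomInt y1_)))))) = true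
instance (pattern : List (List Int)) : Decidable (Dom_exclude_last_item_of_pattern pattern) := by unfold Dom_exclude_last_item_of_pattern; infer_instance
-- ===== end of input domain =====

-- B change (objective: alternative): A's index loop with a last-iteration branch and
-- element-by-element inner appends is replaced by a structural recursion whose base case
-- handles the last event.

-- ===== PORT A =====
-- literal transliteration: outer loop over range(len(pattern)); inner loops append element by element
def exclude_last_item_of_pattern (pattern : List (List Int)) : List (List Int) :=
  (List.range pattern.length).foldl
    (fun new_pattern i =>
      if i = pattern.length - 1 then
        if (pattern.getD i []).length = 1 then
          new_pattern
        else
          new_pattern ++ [(List.range ((pattern.getD i []).length - 1)).foldl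
            (fun ev j => ev ++ [(pattern.getD i []).getD j 0]) []]
      else
        new_pattern ++ [(List.range (pattern.getD i []).length).foldl
          (fun ev j => ev ++ [(pattern.getD i []).getD j 0]) []])
    []

-- ===== PORT B =====
-- structural recursion following Source B: empty → [], single event → truncate or drop, else cons head
def exclude_last_item_of_pattern_alt : List (List Int) → List (List Int)
  | [] => []
  | [head] => if head.length = 1 then [] else [head.dropLast]
  | head :: rest => head :: exclude_last_item_of_pattern_alt rest

-- ===== PRECONDITION & SPEC =====
def Spec_exclude_last_item_of_pattern (pattern : List (List Int)) (out : List (List Int)) : Prop := out = exclude_last_item_of_pattern_alt pattern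
instance (pattern : List (List Int)) (out : List (List Int)) : Decidable (Spec_exclude_last_item_of_pattern pattern out) := by unfold Spec_exclude_last_item_of_pattern; infer_instance

-- ===== CLAIM (what is proved, stated in full; the proofs are below) =====
def Claim_equal_exclude_last_item_of_pattern : Prop := ∀ (pattern : List (List Int)), Dom_exclude_last_item_of_pattern pattern → Spec_exclude_last_item_of_pattern pattern (exclude_last_item_of_pattern pattern)

-- ===== LEMMAS AND PROOFS =====

-- the inner element-copy loop rebuilds a prefix of the event
lemma inner_copy (ev : List Int) (n : Nat) (h : n ≤ ev.length) :
    (List.range n).foldl (fun e j => e ++ [ev.getD j 0]) [] = ev.take n := by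
  induction n with
  | zero => simp
  | succ k ih =>
      have hk : k ≤ ev.length := Nat.le_of_succ_le h
      rw [List.range_succ, List.foldl_append, ih hk]
      have hlt : k < ev.length := h
      have ht : ev.take (k+1) = ev.take k ++ [ev[k]] := by
        rw [List.take_add_one]; simp [List.getElem?_eq_getElem hlt]
      have hg : ev.getD k 0 = ev[k] := by
        rw [List.getD_eq_getElem?_getD, List.getElem?_eq_getElem hlt]; rfl
      simp only [List.foldl_cons, List.foldl_nil]
      rw [hg, ht]

-- the outer loop over the first m < len positions copies those events verbatim
lemma outer_prefix (pattern : List (List Int)) (m : Nat) (h : m < pattern.length) :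
    (List.range m).foldl
      (fun new_pattern i =>
        if i = pattern.length - 1 then
          if (pattern.getD i []).length = 1 then
            new_pattern
          else
            new_pattern ++ [(List.range ((pattern.getD i []).length - 1)).foldl
              (fun ev j => ev ++ [(pattern.getD i []).getD j 0]) []]
        else
          new_pattern ++ [(List.range (pattern.getD i []).length).foldl
            (fun ev j => ev ++ [(pattern.getD i []).getD j 0]) []])
      []
    = pattern.take m := by
  induction m with
  | zero => simp
  | succ k ih =>
      have hk : k < pattern.length := Nat.lt_of_succ_lt h
      rw [List.range_succ, List.foldl_append, ih hk]
      have hne : k ≠ pattern.length - 1 := by omega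
      have hgd : pattern.getD k [] = pattern[k] := by
        rw [List.getD_eq_getElem?_getD, List.getElem?_eq_getElem hk]; rfl
      have ht : pattern.take (k+1) = pattern.take k ++ [pattern[k]] := by
        rw [List.take_add_one]; simp [List.getElem?_eq_getElem hk]
      simp only [List.foldl_cons, List.foldl_nil, if_neg hne, hgd]
      rw [inner_copy pattern[k] pattern[k].length (le_refl _), List.take_length, ht]

-- A's result, characterised: all-but-last events verbatim, last event truncated or dropped
lemma portA_char (pattern : List (List Int)) (last : List Int)
    (hp : pattern.getLast? = some last) :
    exclude_last_item_of_pattern pattern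
      = pattern.dropLast ++ (if last.length = 1 then [] else [last.dropLast]) := by
  unfold exclude_last_item_of_pattern
  have hne : pattern ≠ [] := by intro h; subst h; simp at hp
  have hlen : 0 < pattern.length := List.length_pos_iff.mpr hne
  have hsplit : List.range pattern.length
      = List.range (pattern.length - 1) ++ [pattern.length - 1] := by
    have : pattern.length = (pattern.length - 1) + 1 := by omega
    rw [this, List.range_succ]; simp [this.symm]
  rw [hsplit, List.foldl_append, outer_prefix pattern (pattern.length - 1) (by omega)]
  have hlt : pattern.length - 1 < pattern.length := by omega
  have hlast : pattern[pattern.length - 1] = last := by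
    have h2 : pattern[pattern.length - 1]? = some last := by
      rw [← List.getLast?_eq_getElem?]; exact hp
    rw [List.getElem?_eq_getElem hlt] at h2
    exact Option.some.inj h2
  have hgd : pattern.getD (pattern.length - 1) [] = last := by
    rw [List.getD_eq_getElem?_getD, List.getElem?_eq_getElem hlt, hlast]; rfl
  simp only [List.foldl_cons, List.foldl_nil, hgd]
  rw [inner_copy last (last.length - 1) (by omega)]
  have htake : pattern.take (pattern.length - 1) = pattern.dropLast := by
    simp [List.dropLast_eq_take]
  have hdl : last.take (last.length - 1) = last.dropLast := by
    simp [List.dropLast_eq_take]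
  by_cases h1 : last.length = 1 <;> simp [h1, htake, hdl]

-- B's recursion, characterised the same way
lemma portB_char (pattern : List (List Int)) (last : List Int)
    (hp : pattern.getLast? = some last) :
    exclude_last_item_of_pattern_alt pattern
      = pattern.dropLast ++ (if last.length = 1 then [] else [last.dropLast]) := by
  induction pattern with
  | nil => simp at hp
  | cons head rest ih =>
      cases rest with
      | nil =>
          simp only [List.getLast?_singleton] at hp
          cases hp
          simp [exclude_last_item_of_pattern_alt]
      | cons e rs =>
          have hrest : (e :: rs).getLast? = some last := by
            rw [List.getLast?_cons_cons] at hp; exact hp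
          simp only [exclude_last_item_of_pattern_alt, ih hrest,
            List.dropLast_cons_of_ne_nil (by simp : (e :: rs) ≠ [])]
          simp

-- ===== VERDICT (by name: the statement is the Claim_ definition above) =====
theorem exclude_last_item_of_pattern_spec : Claim_equal_exclude_last_item_of_pattern := by
  intro pattern _
  unfold Spec_exclude_last_item_of_pattern
  cases hp : pattern.getLast? with
  | none =>
      have : pattern = [] := List.getLast?_eq_none_iff.mp hp
      subst this; rfl
  | some last =>
      rw [portA_char pattern last hp, portB_char pattern last hp]
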